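-- pv_equiv track=rewrite | github.com/jilljenn/tryalgo | tryalgo/rabin_karp.py | rabin_karp_factor
-- ===== SOURCE A (Python) =====
-- PRIME = 72057594037927931     # < 2^{56}
--
-- DOMAIN = 128
--
-- def roll_hash(old_val, out_digit, in_digit, last_pos):
--     """roll_hash """
--     val = (old_val - out_digit * last_pos + DOMAIN * PRIME) % PRIME
--     val = (val * DOMAIN) % PRIME
--     return (val + in_digit) % PRIME
--
-- def matches(s, t, i, j, k):
--     """
--     Checks whether s[i:i + k] is equal to t[j:j + k].
--     We used a loop to ease the implementation in other languages.
--     """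
--     # tests if s[i:i + k] equals t[j:j + k]
--     for d in range(k):
--         if s[i + d] != t[j + d]:
--             return False
--     return True
--
-- def rabin_karp_factor(s, t, k):
--     """Find a common factor by Rabin-Karp
--
--     :param string s: haystack
--     :param string t: needle
--     :param int k: factor length
--     :returns: (i, j) such that s[i:i + k] == t[j:j + k] or None.
--               In case of tie, lexicographical minimum (i, j) is returned
--     :complexity: O(len(s) + len(t)) in expected time,
--                 and O(len(s) + len(t) * k) in worst case
--     """
--     last_pos = pow(DOMAIN, k - 1) % PRIME
--     pos = {}
--     assert k > 0
--     if len(s) < k or len(t) < k: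
--         return None
--     hash_t = 0
--
--     # First calculate hash values of factors of t
--     for j in range(k):
--         hash_t = (DOMAIN * hash_t + ord(t[j])) % PRIME
--     for j in range(len(t) - k + 1):
--         # store the start position with the hash value
--         if hash_t in pos:
--             pos[hash_t].append(j)
--         else:
--             pos[hash_t] = [j]
--         if j < len(t) - k:
--             hash_t = roll_hash(hash_t, ord(t[j]), ord(t[j + k]), last_pos)
--
--     hash_s = 0
--     # Now check for matching factors in s
--     for i in range(k):         # preprocessing
--         hash_s = (DOMAIN * hash_s + ord(s[i])) % PRIME
--     for i in range(len(s) - k + 1):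
--         if hash_s in pos:      # is this signature in s?
--             for j in pos[hash_s]:
--                 if matches(s, t, i, j, k):
--                     return (i, j)
--         if i < len(s) - k:
--             hash_s = roll_hash(hash_s, ord(s[i]), ord(s[i + k]), last_pos)
--     return None
-- ===== SOURCE B (Python) =====
-- def rabin_karp_factor(s, t, k):
--     """Find a common length-k factor of s and t directly: index every
--     length-k substring of t by its first start, then scan s."""
--     assert k > 0
--     if len(s) < k or len(t) < k:
--         return None
--     first = {}
--     for j in range(len(t) - k + 1):
--         first.setdefault(t[j:j + k], j)
--     for i in range(len(s) - k + 1):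
--         j = first.get(s[i:i + k])
--         if j is not None:
--             return (i, j)
--     return None
-- ===== Notes on version B (the rewrite author's own statement) =====
-- stated objective: simpler
-- what changed: Replaces the rolling-hash machinery (polynomial hashes mod a 56-bit prime, a hash-to-positions dict with a collision-verifying inner scan) by a direct dict from each length-k substring of t to its first occurrence index, then one scan of s's length-k substrings; same smallest-i-then-smallest-j answer.
import Mathlib
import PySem

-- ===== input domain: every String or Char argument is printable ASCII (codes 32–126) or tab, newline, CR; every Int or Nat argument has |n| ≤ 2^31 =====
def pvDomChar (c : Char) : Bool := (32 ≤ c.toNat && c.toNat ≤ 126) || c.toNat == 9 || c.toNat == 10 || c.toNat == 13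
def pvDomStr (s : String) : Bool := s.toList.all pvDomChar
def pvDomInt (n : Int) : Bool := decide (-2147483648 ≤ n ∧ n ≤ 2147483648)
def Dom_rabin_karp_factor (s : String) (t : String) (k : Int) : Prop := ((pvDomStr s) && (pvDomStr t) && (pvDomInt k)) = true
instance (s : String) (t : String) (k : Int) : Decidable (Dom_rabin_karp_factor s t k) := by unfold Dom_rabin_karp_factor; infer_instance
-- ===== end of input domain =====

-- B replaces A's rolling-hash + collision-check machinery by a direct dict from each
-- length-k substring of t to its first index, then one scan of s (objective: simpler).

-- ===== PORT A =====
def pvPRIME : Int := 72057594037927931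
def pvDOMAIN : Int := 128

-- ord(l[i]); every call site keeps i in range, the default is never reached inside Pre_
def pvOrd (l : List Char) (i : Int) : Int := ((PySem.List.pyGetD l i ' ').toNat : Int)

def pvRollHash (old_val out_digit in_digit last_pos : Int) : Int :=
  let val := PySem.Int.mod (old_val - out_digit * last_pos + pvDOMAIN * pvPRIME) pvPRIME
  let val2 := PySem.Int.mod (val * pvDOMAIN) pvPRIME
  PySem.Int.mod (val2 + in_digit) pvPRIME

-- matches(s, t, i, j, k): the early-return loop over d in range(k)
def pvMatches (ls lt : List Char) (i j k : Int) : Bool :=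
  (PySem.List.pyRange 0 k 1).all
    (fun d => PySem.List.pyGetD ls (i + d) ' ' == PySem.List.pyGetD lt (j + d) ' ')

-- body of A's j-loop over t: state = (pos, hash_t)
def pvTStep (lt : List Char) (k last_pos : Int)
    (st : PySem.Dict Int (List Int) × Int) (j : Int) : PySem.Dict Int (List Int) × Int :=
  let pos := match st.1.get? st.2 with
    | some l => st.1.insert st.2 (l ++ [j])
    | none => st.1.insert st.2 [j]
  let h := if j < (lt.length : Int) - k then
      pvRollHash st.2 (pvOrd lt j) (pvOrd lt (j + k)) last_pos
    else st.2
  (pos, h)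

-- A's i-loop over s, with its early return
def pvSearchA (ls lt : List Char) (k last_pos : Int) (pos : PySem.Dict Int (List Int)) :
    List Int → Int → Option (Int × Int)
  | [], _ => none
  | i :: rest, hs =>
    match (match pos.get? hs with
           | some js => (js.find? (fun j => pvMatches ls lt i j k)).map (fun j => (i, j))
           | none => none) with
    | some r => some r
    | none =>
      pvSearchA ls lt k last_pos pos rest
        (if i < (ls.length : Int) - k then pvRollHash hs (pvOrd ls i) (pvOrd ls (i + k)) last_pos
         else hs)

def rabin_karp_factor (s : String) (t : String) (k : Int) : Option (Int × Int) :=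
  let ls := s.toList
  let lt := t.toList
  if k ≤ 0 then none  -- assert k > 0 raises AssertionError: outside Pre_
  else if (ls.length : Int) < k ∨ (lt.length : Int) < k then none
  else
    let last_pos := PySem.Int.mod (pvDOMAIN ^ (k - 1).toNat) pvPRIME
    let hash_t :=
      (PySem.List.pyRange 0 k 1).foldl
        (fun h j => PySem.Int.mod (pvDOMAIN * h + pvOrd lt j) pvPRIME) 0
    let st :=
      (PySem.List.pyRange 0 ((lt.length : Int) - k + 1) 1).foldl
        (pvTStep lt k last_pos) (PySem.Dict.empty, hash_t)
    let hash_s :=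
      (PySem.List.pyRange 0 k 1).foldl
        (fun h i => PySem.Int.mod (pvDOMAIN * h + pvOrd ls i) pvPRIME) 0
    pvSearchA ls lt k last_pos st.1 (PySem.List.pyRange 0 ((ls.length : Int) - k + 1) 1) hash_s

-- ===== PORT B =====
-- first = {}; for j: first.setdefault(t[j:j+k], j)
def pvFirstDict (lt : List Char) (k : Int) : PySem.Dict (List Char) Int :=
  (PySem.List.pyRange 0 ((lt.length : Int) - k + 1) 1).foldl
    (fun d j => d.setdefault (PySem.List.slice lt (some j) (some (j + k))) j) PySem.Dict.empty

-- B's i-loop over s with its early return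
def pvSearchB (ls : List Char) (k : Int) (first : PySem.Dict (List Char) Int) :
    List Int → Option (Int × Int)
  | [] => none
  | i :: rest =>
    match first.get? (PySem.List.slice ls (some i) (some (i + k))) with
    | some j => some (i, j)
    | none => pvSearchB ls k first rest

def rabin_karp_factor_alt (s : String) (t : String) (k : Int) : Option (Int × Int) :=
  let ls := s.toList
  let lt := t.toList
  if k ≤ 0 then none  -- assert k > 0 raises AssertionError: outside Pre_
  else if (ls.length : Int) < k ∨ (lt.length : Int) < k then none
  else
    pvSearchB ls k (pvFirstDict lt k) (PySem.List.pyRange 0 ((ls.length : Int) - k + 1) 1)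

-- ===== PRECONDITION & SPEC =====
-- Pre_ excludes only k ≤ 0, where A's `assert k > 0` raises AssertionError (and B's does too).
def Pre_rabin_karp_factor (s : String) (t : String) (k : Int) : Prop := 0 < k
instance (s : String) (t : String) (k : Int) : Decidable (Pre_rabin_karp_factor s t k) := by
  unfold Pre_rabin_karp_factor; infer_instance

def pvWitness_rabin_karp_factor : String × String × Int := ("abcab", "zzbca", 2)

def Spec_rabin_karp_factor (s : String) (t : String) (k : Int) (out : Option (Int × Int)) : Prop :=
  out = rabin_karp_factor_alt s t k
instance (s : String) (t : String) (k : Int) (out : Option (Int × Int)) :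
    Decidable (Spec_rabin_karp_factor s t k out) := by unfold Spec_rabin_karp_factor; infer_instance

-- ===== CLAIM (what is proved, stated in full; the proofs are below) =====
def Claim_equal_rabin_karp_factor : Prop :=
  ∀ (s : String) (t : String) (k : Int), Dom_rabin_karp_factor s t k →
    Pre_rabin_karp_factor s t k → Spec_rabin_karp_factor s t k (rabin_karp_factor s t k)

-- ===== LEMMAS AND PROOFS =====

-- proof-level notions: pure/modular Horner steps and the window s[j:j+kn]
def pvHStep (h : Int) (c : Char) : Int := (pvDOMAIN * h + (c.toNat : Int)) % pvPRIME
def pvPStep (a : Int) (c : Char) : Int := pvDOMAIN * a + (c.toNat : Int)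
def pvHashW (w : List Char) : Int := w.foldl pvHStep 0
def pvPVW (w : List Char) : Int := w.foldl pvPStep 0
def pvWin (l : List Char) (j kn : Nat) : List Char := (l.drop j).take kn
def pvOptList (L : List Int) : Option (List Int) := if L = [] then none else some L

theorem pv_modP (a : Int) : PySem.Int.mod a pvPRIME = a % pvPRIME := by
  show Int.fmod a pvPRIME = a % pvPRIME
  rw [Int.fmod_eq_emod]; simp [pvPRIME]

theorem pv_foldl_pstep (w : List Char) (a : Int) :
    w.foldl pvPStep a = a * pvDOMAIN ^ w.length + pvPVW w := by
  induction w generalizing a with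
  | nil => simp [pvPVW]
  | cons c m ih =>
    simp only [List.foldl_cons, List.length_cons, pvPVW, pvPStep] at *
    rw [ih, ih (pvDOMAIN * 0 + (c.toNat : Int))]
    ring

theorem pv_foldl_hstep_mod (w : List Char) (a : Int) :
    w.foldl pvHStep (a % pvPRIME) = (w.foldl pvPStep a) % pvPRIME := by
  induction w generalizing a with
  | nil => simp
  | cons c m ih =>
    simp only [List.foldl_cons, pvHStep, pvPStep]
    rw [← ih]
    congr 1
    rw [Int.add_emod (pvDOMAIN * (a % pvPRIME)), Int.mul_emod, Int.emod_emod_of_dvd a dvd_rfl,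
      ← Int.mul_emod, ← Int.add_emod]

theorem pv_hashW_eq (w : List Char) : pvHashW w = pvPVW w % pvPRIME := by
  have := pv_foldl_hstep_mod w 0
  simpa [pvHashW, pvPVW] using this

theorem pv_roll_correct (c d : Char) (m : List Char) :
    pvRollHash (pvHashW (c :: m)) ((c.toNat : Int)) ((d.toNat : Int))
      (pvDOMAIN ^ m.length % pvPRIME) = pvHashW (m ++ [d]) := by
  have hP : (0:Int) < pvPRIME := by norm_num [pvPRIME]
  have B : ∀ a : Int, a % pvPRIME % pvPRIME = a % pvPRIME := fun a =>
    Int.emod_emod_of_dvd a dvd_rfl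
  simp only [pvRollHash, pv_modP, pv_hashW_eq]
  have hcons : pvPVW (c :: m) = (c.toNat : Int) * pvDOMAIN ^ m.length + pvPVW m := by
    have := pv_foldl_pstep m (pvPStep 0 c)
    simp only [pvPVW, List.foldl_cons] at *
    rw [this]; simp [pvPStep]
  have hsnoc : pvPVW (m ++ [d]) = pvDOMAIN * pvPVW m + (d.toNat : Int) := by
    simp [pvPVW, List.foldl_append, pvPStep]
  rw [hcons, hsnoc]
  set X := pvPVW m with hX
  set e : Int := pvDOMAIN ^ m.length with he
  set cc : Int := (c.toNat : Int) with hcc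
  set dd : Int := (d.toNat : Int) with hdd
  have h1 : ((cc * e + X) % pvPRIME - cc * (e % pvPRIME) + pvDOMAIN * pvPRIME) % pvPRIME
      = X % pvPRIME := by
    have m1 : ((cc * e + X) % pvPRIME - cc * (e % pvPRIME) + pvDOMAIN * pvPRIME) % pvPRIME
        = ((cc * e + X) % pvPRIME - cc * (e % pvPRIME)) % pvPRIME := Int.add_mul_emod_self_right ..
    rw [m1, Int.sub_emod, B, Int.mul_emod cc (e % pvPRIME), B, ← Int.mul_emod, ← Int.sub_emod]
    ring_nf
  rw [h1]
  rw [Int.mul_emod (X % pvPRIME) pvDOMAIN, B, ← Int.mul_emod]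
  rw [Int.add_emod (X * pvDOMAIN % pvPRIME) dd, B, ← Int.add_emod]
  ring_nf

theorem pv_ordAt (l : List Char) (j : Nat) (h : j < l.length) :
    pvOrd l (j : Int) = ((l[j].toNat : Int)) := by
  simp [pvOrd, PySem.List.pyGetD_natCast, List.getD_eq_getElem?_getD, h]

theorem pv_win_cons (l : List Char) (j kk : Nat) (h : j < l.length) :
    pvWin l j (kk + 1) = l[j] :: pvWin l (j + 1) kk := by
  simp only [pvWin]
  rw [List.drop_eq_getElem_cons h, List.take_succ_cons]

theorem pv_win_snoc (l : List Char) (j kk : Nat) (h : j + kk < l.length) :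
    pvWin l j (kk + 1) = pvWin l j kk ++ [l[j + kk]] := by
  simp only [pvWin]
  rw [List.take_succ]
  congr 1
  have hlt : kk < (l.drop j).length := by simp; omega
  simp [List.getElem?_eq_getElem hlt]

theorem pv_len_win (l : List Char) (j kn : Nat) (h : j + kn ≤ l.length) :
    (pvWin l j kn).length = kn := by
  simp [pvWin]; omega

theorem pv_roll_win (l : List Char) (j kn : Nat) (hkn : 0 < kn) (h : j + 1 + kn ≤ l.length) :
    pvRollHash (pvHashW (pvWin l j kn)) (pvOrd l (j : Int)) (pvOrd l ((j : Int) + (kn : Int)))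
      (pvDOMAIN ^ (kn - 1) % pvPRIME) = pvHashW (pvWin l (j + 1) kn) := by
  obtain ⟨kk, rfl⟩ : ∃ kk, kn = kk + 1 := ⟨kn - 1, by omega⟩
  have hj : j < l.length := by omega
  have hjk : j + kk < l.length := by omega
  have h1 : pvWin l j (kk + 1) = l[j] :: pvWin l (j + 1) kk := pv_win_cons l j kk hj
  have h2 : pvWin l (j + 1) (kk + 1) = pvWin l (j + 1) kk ++ [l[j + 1 + kk]] := by
    refine pv_win_snoc l (j + 1) kk (by omega)
  have hlenm : (pvWin l (j + 1) kk).length = kk := pv_len_win l (j + 1) kk (by omega)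
  have ho1 : pvOrd l (j : Int) = ((l[j].toNat : Int)) := pv_ordAt l j hj
  have ho2 : pvOrd l ((j : Int) + ((kk + 1 : Nat) : Int)) = ((l[j + 1 + kk].toNat : Int)) := by
    have hcast : ((j : Int) + ((kk + 1 : Nat) : Int)) = (((j + 1 + kk : Nat)) : Int) := by
      push_cast; ring
    rw [hcast, pv_ordAt l (j + 1 + kk) (by omega)]
    rfl
  rw [h1, h2, ho1, ho2]
  have := pv_roll_correct l[j] l[j + 1 + kk] (pvWin l (j + 1) kk)
  rw [hlenm] at this
  simpa using this

theorem pv_getAt (l : List Char) (a : Nat) (h : a < l.length) :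
    PySem.List.pyGetD l ((a : Nat) : Int) ' ' = l[a] := by
  simp [PySem.List.pyGetD_natCast, List.getD_eq_getElem?_getD, h]

theorem pv_win_getElem (l : List Char) (a kn d : Nat) (hd : d < kn) (h : a + kn ≤ l.length)
    (hd' : d < (pvWin l a kn).length) :
    (pvWin l a kn)[d] = l[a + d]'(by omega) := by
  simp [pvWin, List.getElem_take, List.getElem_drop]

theorem pv_init_hash (l : List Char) (kn : Nat) (h : kn ≤ l.length) :
    (PySem.List.pyRange 0 (kn : Int) 1).foldl
      (fun hh j => PySem.Int.mod (pvDOMAIN * hh + pvOrd l j) pvPRIME) 0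
      = pvHashW (pvWin l 0 kn) := by
  have hwin : pvWin l 0 kn = l.take kn := by simp [pvWin]
  have hlen : (l.take kn).length = kn := by simp; omega
  have hr : ((kn : Nat) : Int) = (((l.take kn).length : Nat) : Int) := by rw [hlen]
  rw [hwin, hr]
  have hcongr : ∀ (acc : Int), ∀ j ∈ PySem.List.pyRange 0 (((l.take kn).length : Nat) : Int) 1,
      PySem.Int.mod (pvDOMAIN * acc + pvOrd l j) pvPRIME
        = pvHStep acc (PySem.List.pyGetD (l.take kn) j ' ') := by
    intro acc j hj
    rw [PySem.List.mem_pyRange_one] at hj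
    obtain ⟨jn, rfl⟩ : ∃ jn : Nat, j = (jn : Int) := ⟨j.toNat, by omega⟩
    have hjn : jn < kn := by omega
    rw [pv_modP, pvHStep, pv_getAt (l.take kn) jn (by omega), pvOrd, pv_getAt l jn (by omega)]
    congr 2
    rw [List.getElem_take]
  rw [PySem.List.foldl_congr_mem _ _ _ _ hcongr]
  exact PySem.List.foldl_pyRange_zero_pyGetD' (l.take kn) ' ' pvHStep 0

theorem pv_slice_win (l : List Char) (i kq : Int) (hi : 0 ≤ i) (hk : 0 ≤ kq) :
    PySem.List.slice l (some i) (some (i + kq)) = pvWin l i.toNat kq.toNat := by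
  rw [PySem.List.slice_toNat l hi (by omega)]
  simp only [pvWin]
  congr 1
  omega

theorem pv_matches_eq (ls lt : List Char) (i j kn : Nat)
    (hi : i + kn ≤ ls.length) (hj : j + kn ≤ lt.length) :
    pvMatches ls lt (i : Int) (j : Int) (kn : Int) = (pvWin lt j kn == pvWin ls i kn) := by
  rw [Bool.eq_iff_iff]
  constructor
  · intro hall
    rw [pvMatches, List.all_eq_true] at hall
    rw [beq_iff_eq]
    apply List.ext_getElem
    · rw [pv_len_win lt j kn hj, pv_len_win ls i kn hi]
    · intro d hd1 hd2
      have hdk : d < kn := by rw [pv_len_win lt j kn hj] at hd1; exact hd1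
      have hmem : ((d : Nat) : Int) ∈ PySem.List.pyRange 0 ((kn : Nat) : Int) 1 := by
        rw [PySem.List.mem_pyRange_one]; omega
      have := hall _ hmem
      rw [show ((i : Nat) : Int) + ((d : Nat) : Int) = (((i + d : Nat)) : Int) by push_cast; ring,
          show ((j : Nat) : Int) + ((d : Nat) : Int) = (((j + d : Nat)) : Int) by push_cast; ring,
          pv_getAt ls (i + d) (by omega), pv_getAt lt (j + d) (by omega), beq_iff_eq] at this
      rw [pv_win_getElem lt j kn d hdk hj, pv_win_getElem ls i kn d hdk hi]
      exact this.symm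
  · intro heq
    rw [beq_iff_eq] at heq
    rw [pvMatches, List.all_eq_true]
    intro d hd
    rw [PySem.List.mem_pyRange_one] at hd
    obtain ⟨dn, rfl⟩ : ∃ dn : Nat, d = (dn : Int) := ⟨d.toNat, by omega⟩
    have hdk : dn < kn := by omega
    rw [show ((i : Nat) : Int) + ((dn : Nat) : Int) = (((i + dn : Nat)) : Int) by push_cast; ring,
        show ((j : Nat) : Int) + ((dn : Nat) : Int) = (((j + dn : Nat)) : Int) by push_cast; ring,
        pv_getAt ls (i + dn) (by omega), pv_getAt lt (j + dn) (by omega), beq_iff_eq]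
    have hltT : dn < (pvWin lt j kn).length := by rw [pv_len_win lt j kn hj]; exact hdk
    have hltS : dn < (pvWin ls i kn).length := by rw [pv_len_win ls i kn hi]; exact hdk
    have e1 := pv_win_getElem lt j kn dn hdk hj hltT
    have e2 := pv_win_getElem ls i kn dn hdk hi hltS
    have e0 := List.getElem_of_eq heq hltT
    calc ls[i + dn]'(by omega) = (pvWin ls i kn)[dn]'hltS := e2.symm
      _ = (pvWin lt j kn)[dn]'hltT := e0.symm
      _ = lt[j + dn]'(by omega) := e1

theorem pv_find?_congr (l : List Int) (p q : Int → Bool) (h : ∀ x ∈ l, p x = q x) :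
    l.find? p = l.find? q := by
  induction l with
  | nil => rfl
  | cons a t ih => simp only [List.find?_cons, h a (by simp)]; cases q a <;> simp_all

theorem pv_match_optList (L js : List Int) (p : Int → Bool) (q : Int → Bool)
    (h : pvOptList (L.filter q) = some js) :
    js.find? p = L.find? (fun x => q x && p x) := by
  rw [pvOptList] at h
  split_ifs at h with hne
  cases h
  rw [List.find?_filter]
  congr 1
  funext x
  cases q x <;> cases p x <;> simp

theorem pv_first_step (f : Int → List Char) (d : PySem.Dict (List Char) Int)
    (L : List Int) (n : Int)
    (ih : ∀ w, d.get? w = L.find? (fun j => f j == w)) :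
    ∀ w, (d.setdefault (f n) n).get? w = (L ++ [n]).find? (fun j => f j == w) := by
  intro w
  rw [List.find?_append]
  by_cases hw : w = f n
  · rw [hw]
    have hsing : [n].find? (fun j => f j == f n) = some n := by simp [List.find?]
    rw [hsing]
    by_cases hc : d.contains (f n) = true
    · rw [PySem.Dict.setdefault_of_contains d n hc, ih (f n)]
      rw [PySem.Dict.contains_eq_isSome_get?, ih (f n)] at hc
      cases hfind : L.find? (fun j => f j == f n) with
      | some v => rfl
      | none => rw [hfind] at hc; simp at hc
    · rw [PySem.Dict.setdefault_of_not_contains d n (by simpa using hc),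
        PySem.Dict.get?_insert, if_pos rfl]
      rw [PySem.Dict.contains_eq_isSome_get?, ih (f n)] at hc
      cases hfind : L.find? (fun j => f j == f n) with
      | some v => rw [hfind] at hc; simp at hc
      | none => rfl
  · have hsing : [n].find? (fun j => f j == w) = none := by
      have : (f n == w) = false := by rw [beq_eq_false_iff_ne]; intro h; exact hw h.symm
      simp [List.find?, this]
    rw [hsing]
    have hkeep : (d.setdefault (f n) n).get? w = d.get? w := by
      by_cases hc : d.contains (f n) = true
      · rw [PySem.Dict.setdefault_of_contains d n hc]
      · rw [PySem.Dict.setdefault_of_not_contains d n (by simpa using hc),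
          PySem.Dict.get?_insert, if_neg hw]
    rw [hkeep, ih w]
    cases hfind : L.find? (fun j => f j == w) <;> rfl

theorem pv_pos_step (f : Int → Int) (d : PySem.Dict Int (List Int)) (L : List Int) (n : Int)
    (ih : ∀ hh, d.get? hh = pvOptList (L.filter (fun j => f j == hh))) :
    ∀ hh, ((match d.get? (f n) with
            | some l => d.insert (f n) (l ++ [n])
            | none => d.insert (f n) [n]).get? hh)
      = pvOptList ((L ++ [n]).filter (fun j => f j == hh)) := by
  intro hh
  rw [List.filter_append]
  by_cases hw : hh = f n
  · rw [hw]
    have hsing : [n].filter (fun j => f j == f n) = [n] := by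
      rw [List.filter_singleton]; simp
    rw [hsing]
    cases hget : d.get? (f n) with
    | some l =>
      have hfil : L.filter (fun j => f j == f n) = l := by
        have h0 := ih (f n)
        rw [hget, pvOptList] at h0
        by_cases hnil : List.filter (fun j => f j == f n) L = []
        · rw [if_pos hnil] at h0; exact absurd h0 (by simp)
        · rw [if_neg hnil] at h0; exact (Option.some_inj.mp h0).symm
      rw [PySem.Dict.get?_insert, if_pos rfl, hfil, pvOptList, if_neg (by simp)]
    | none =>
      have hfil : L.filter (fun j => f j == f n) = [] := by
        have h0 := ih (f n)
        rw [hget, pvOptList] at h0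
        by_cases hnil : List.filter (fun j => f j == f n) L = []
        · exact hnil
        · rw [if_neg hnil] at h0; exact absurd h0 (by simp)
      rw [PySem.Dict.get?_insert, if_pos rfl, hfil, pvOptList, if_neg (by simp)]
      rfl
  · have hsing : [n].filter (fun j => f j == hh) = [] := by
      rw [List.filter_singleton]
      have : (f n == hh) = false := by rw [beq_eq_false_iff_ne]; intro h; exact hw h.symm
      simp [this]
    rw [hsing, List.append_nil]
    cases hget : d.get? (f n) with
    | some l => rw [PySem.Dict.get?_insert, if_neg hw, ih hh]
    | none => rw [PySem.Dict.get?_insert, if_neg hw, ih hh]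

-- the t-loop invariant of A: pos maps each hash to the ascending list of its window starts,
-- and the carried hash is the hash of the current window
theorem pv_posInv (lt : List Char) (kn : Nat) (hkn : 0 < kn) (hlen : kn ≤ lt.length)
    (n : Nat) (hn : n ≤ lt.length - kn + 1) :
    (∀ h : Int,
      (((PySem.List.pyRange 0 (n : Int) 1).foldl
        (pvTStep lt (kn : Int) (PySem.Int.mod (pvDOMAIN ^ (((kn : Int) - 1).toNat)) pvPRIME))
        (PySem.Dict.empty, pvHashW (pvWin lt 0 kn))).1).get? h
        = pvOptList ((PySem.List.pyRange 0 (n : Int) 1).filter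
            (fun j => pvHashW (pvWin lt j.toNat kn) == h)))
    ∧ (n < lt.length - kn + 1 →
      ((PySem.List.pyRange 0 (n : Int) 1).foldl
        (pvTStep lt (kn : Int) (PySem.Int.mod (pvDOMAIN ^ (((kn : Int) - 1).toNat)) pvPRIME))
        (PySem.Dict.empty, pvHashW (pvWin lt 0 kn))).2 = pvHashW (pvWin lt n kn)) := by
  revert hn
  induction n with
  | zero =>
    intro hn
    rw [Nat.cast_zero, PySem.List.pyRange_one_eq_nil (le_refl 0)]
    constructor
    · intro h
      simp [pvOptList]
    · intro _
      rfl
  | succ n ih =>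
    intro hn
    have hlt : n < lt.length - kn + 1 := by omega
    obtain ⟨ihd, ihh⟩ := ih (by omega)
    have hcast : (((n + 1 : Nat)) : Int) = ((n : Nat) : Int) + 1 := by push_cast; ring
    rw [hcast, PySem.List.pyRange_one_succ_right (Int.natCast_nonneg n), List.foldl_append,
      List.foldl_cons, List.foldl_nil]
    have hsnd : ((PySem.List.pyRange 0 ((n : Nat) : Int) 1).foldl
        (pvTStep lt (kn : Int) (PySem.Int.mod (pvDOMAIN ^ (((kn : Int) - 1).toNat)) pvPRIME))
        (PySem.Dict.empty, pvHashW (pvWin lt 0 kn))).2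
        = (fun j : Int => pvHashW (pvWin lt j.toNat kn)) ((n : Nat) : Int) := by
      simpa using ihh hlt
    constructor
    · intro h
      simp only [pvTStep]
      rw [hsnd]
      exact pv_pos_step (fun j : Int => pvHashW (pvWin lt j.toNat kn)) _ _ _ ihd h
    · intro hlt2
      simp only [pvTStep]
      have hcond : ((n : Nat) : Int) < (lt.length : Int) - (kn : Int) := by
        push_cast; omega
      rw [if_pos hcond, ihh hlt]
      rw [pv_modP]
      have htn : (((kn : Int)) - 1).toNat = kn - 1 := by omega
      rw [htn]
      exact pv_roll_win lt n kn hkn (by omega)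

-- the t-loop invariant of B: first maps each window to its first start
theorem pv_firstInv (lt : List Char) (kq : Int) (n : Nat) :
    ∀ w : List Char,
      ((PySem.List.pyRange 0 (n : Int) 1).foldl
        (fun d j => d.setdefault (PySem.List.slice lt (some j) (some (j + kq))) j)
        PySem.Dict.empty).get? w
      = (PySem.List.pyRange 0 (n : Int) 1).find?
          (fun j => PySem.List.slice lt (some j) (some (j + kq)) == w) := by
  induction n with
  | zero =>
    intro w
    rw [Nat.cast_zero, PySem.List.pyRange_one_eq_nil (le_refl 0)]
    simp
  | succ n ih =>
    intro w
    have hcast : (((n + 1 : Nat)) : Int) = ((n : Nat) : Int) + 1 := by push_cast; ring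
    rw [hcast, PySem.List.pyRange_one_succ_right (Int.natCast_nonneg n), List.foldl_append,
      List.foldl_cons, List.foldl_nil]
    exact pv_first_step (fun j => PySem.List.slice lt (some j) (some (j + kq))) _ _ _ ih w

-- search loops agree
theorem pv_searchEq (ls lt : List Char) (kn : Nat) (hkn : 0 < kn)
    (hs : kn ≤ ls.length) (ht : kn ≤ lt.length) :
    ∀ (c i : Nat), i + c = ls.length - kn + 1 →
    pvSearchA ls lt (kn : Int) (PySem.Int.mod (pvDOMAIN ^ (((kn : Int) - 1).toNat)) pvPRIME)
      ((PySem.List.pyRange 0 ((lt.length : Int) - (kn : Int) + 1) 1).foldl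
        (pvTStep lt (kn : Int) (PySem.Int.mod (pvDOMAIN ^ (((kn : Int) - 1).toNat)) pvPRIME))
        (PySem.Dict.empty, pvHashW (pvWin lt 0 kn))).1
      (PySem.List.pyRange (i : Int) ((ls.length : Int) - (kn : Int) + 1) 1)
      (pvHashW (pvWin ls i kn))
    = pvSearchB ls (kn : Int) (pvFirstDict lt (kn : Int))
        (PySem.List.pyRange (i : Int) ((ls.length : Int) - (kn : Int) + 1) 1) := by
  intro c
  induction c with
  | zero =>
    intro i hi
    have hMi : (ls.length : Int) - (kn : Int) + 1 = ((i : Nat) : Int) := by push_cast; omega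
    rw [hMi, PySem.List.pyRange_one_eq_nil (le_refl _)]
    rfl
  | succ c ih =>
    intro i hi
    have hiM : ((i : Nat) : Int) < (ls.length : Int) - (kn : Int) + 1 := by push_cast; omega
    rw [PySem.List.pyRange_one_cons hiM]
    simp only [pvSearchA, pvSearchB, pvFirstDict]
    have hcastN : (lt.length : Int) - (kn : Int) + 1 = (((lt.length - kn + 1 : Nat)) : Int) := by
      push_cast; omega
    rw [hcastN]
    have hpos := (pv_posInv lt kn hkn ht (lt.length - kn + 1) (le_refl _)).1
    have hfirst := pv_firstInv lt (kn : Int) (lt.length - kn + 1)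
      (PySem.List.slice ls (some ((i : Nat) : Int)) (some (((i : Nat) : Int) + (kn : Int))))
    rw [hfirst, hpos (pvHashW (pvWin ls i kn))]
    have hik : i + kn ≤ ls.length := by omega
    -- the two head lookups agree
    have hhead :
        (match pvOptList ((PySem.List.pyRange 0 (((lt.length - kn + 1 : Nat)) : Int) 1).filter
            (fun j => pvHashW (pvWin lt j.toNat kn) == pvHashW (pvWin ls i kn))) with
         | some js => (js.find? (fun j => pvMatches ls lt ((i : Nat) : Int) j ((kn : Nat) : Int))).map
             (fun j => (((i : Nat) : Int), j))
         | none => none)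
        = ((PySem.List.pyRange 0 (((lt.length - kn + 1 : Nat)) : Int) 1).find?
            (fun j => PySem.List.slice lt (some j) (some (j + (kn : Int)))
              == PySem.List.slice ls (some ((i : Nat) : Int)) (some (((i : Nat) : Int) + (kn : Int))))).map
            (fun j => (((i : Nat) : Int), j)) := by
      have hwinS : PySem.List.slice ls (some ((i : Nat) : Int)) (some (((i : Nat) : Int) + (kn : Int)))
          = pvWin ls i kn := by
        rw [pv_slice_win ls _ _ (Int.natCast_nonneg i) (Int.natCast_nonneg kn)]
        simp
      have hwinT : ∀ jn : Nat, PySem.List.slice lt (some ((jn : Nat) : Int))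
          (some (((jn : Nat) : Int) + (kn : Int))) = pvWin lt jn kn := by
        intro jn
        rw [pv_slice_win lt _ _ (Int.natCast_nonneg jn) (Int.natCast_nonneg kn)]
        simp
      cases hopt : pvOptList ((PySem.List.pyRange 0 (((lt.length - kn + 1 : Nat)) : Int) 1).filter
          (fun j => pvHashW (pvWin lt j.toNat kn) == pvHashW (pvWin ls i kn))) with
      | none =>
        have hfilnil : (PySem.List.pyRange 0 (((lt.length - kn + 1 : Nat)) : Int) 1).filter
            (fun j => pvHashW (pvWin lt j.toNat kn) == pvHashW (pvWin ls i kn)) = [] := by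
          rw [pvOptList] at hopt
          by_cases hnil : (PySem.List.pyRange 0 (((lt.length - kn + 1 : Nat)) : Int) 1).filter
              (fun j => pvHashW (pvWin lt j.toNat kn) == pvHashW (pvWin ls i kn)) = []
          · exact hnil
          · rw [if_neg hnil] at hopt
            exact absurd hopt (by simp)
        have hq := List.filter_eq_nil_iff.mp hfilnil
        have hF : (PySem.List.pyRange 0 (((lt.length - kn + 1 : Nat)) : Int) 1).find?
            (fun j => PySem.List.slice lt (some j) (some (j + (kn : Int)))
              == PySem.List.slice ls (some ((i : Nat) : Int)) (some (((i : Nat) : Int) + (kn : Int)))) = none := by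
          rw [List.find?_eq_none]
          intro j hj hpj
          rw [PySem.List.mem_pyRange_one] at hj
          obtain ⟨jn, rfl⟩ : ∃ jn : Nat, j = (jn : Int) := ⟨j.toNat, by omega⟩
          rw [hwinT jn, hwinS, beq_iff_eq] at hpj
          refine hq (jn : Int) (by rw [PySem.List.mem_pyRange_one]; omega) ?_
          simp only [Int.toNat_natCast, hpj]
          simp
        rw [hF]
        all_goals rfl
      | some js =>
        have hfind := pv_match_optList _ js
          (fun j => pvMatches ls lt ((i : Nat) : Int) j ((kn : Nat) : Int))
          (fun j => pvHashW (pvWin lt j.toNat kn) == pvHashW (pvWin ls i kn)) hopt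
        dsimp only
        rw [hfind]
        congr 1
        apply pv_find?_congr
        intro j hj
        rw [PySem.List.mem_pyRange_one] at hj
        obtain ⟨jn, rfl⟩ : ∃ jn : Nat, j = (jn : Int) := ⟨j.toNat, by omega⟩
        have hjk : jn + kn ≤ lt.length := by omega
        dsimp only
        rw [hwinT jn, hwinS, pv_matches_eq ls lt i jn kn hik hjk]
        simp only [Int.toNat_natCast]
        by_cases hAB : pvWin lt jn kn = pvWin ls i kn
        · rw [hAB]
          simp
        · have h1 : (pvWin lt jn kn == pvWin ls i kn) = false := by
            rw [beq_eq_false_iff_ne]; exact hAB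
          rw [h1]
          simp
    rw [hhead]
    cases hF : (PySem.List.pyRange 0 (((lt.length - kn + 1 : Nat)) : Int) 1).find?
        (fun j => PySem.List.slice lt (some j) (some (j + (kn : Int)))
          == PySem.List.slice ls (some ((i : Nat) : Int)) (some (((i : Nat) : Int) + (kn : Int)))) with
    | some j => rfl
    | none =>
      simp only [Option.map_none]
      have hcast1 : ((i : Nat) : Int) + 1 = (((i + 1 : Nat)) : Int) := by push_cast; ring
      rw [hcast1]
      by_cases h2 : i + 1 < ls.length - kn + 1
      · have hcond : ((i : Nat) : Int) < (ls.length : Int) - (kn : Int) := by push_cast; omega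
        have hroll : pvRollHash (pvHashW (pvWin ls i kn)) (pvOrd ls ((i : Nat) : Int))
            (pvOrd ls (((i : Nat) : Int) + (kn : Int)))
            (PySem.Int.mod (pvDOMAIN ^ (((kn : Int) - 1).toNat)) pvPRIME)
            = pvHashW (pvWin ls (i + 1) kn) := by
          rw [pv_modP]
          have htn : (((kn : Int)) - 1).toNat = kn - 1 := by omega
          rw [htn]
          exact pv_roll_win ls i kn hkn (by omega)
        rw [if_pos hcond, hroll]
        have hrec := ih (i + 1) (by omega)
        simp only [pvFirstDict] at hrec
        rw [hcastN] at hrec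
        exact hrec
      · have hnil : PySem.List.pyRange (((i + 1 : Nat)) : Int) ((ls.length : Int) - (kn : Int) + 1) 1 = [] :=
          PySem.List.pyRange_one_eq_nil (by push_cast; omega)
        rw [hnil]
        rfl

-- ===== VERDICT (by name: the statement is the Claim_ definition above) =====
theorem rabin_karp_factor_spec : Claim_equal_rabin_karp_factor := by
  intro s t k _ hpre
  unfold Pre_rabin_karp_factor at hpre
  unfold Spec_rabin_karp_factor
  simp only [rabin_karp_factor, rabin_karp_factor_alt]
  rw [if_neg (by omega : ¬ k ≤ 0), if_neg (by omega : ¬ k ≤ 0)]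
  by_cases hshort : ((s.toList.length : Int) < k ∨ (t.toList.length : Int) < k)
  · rw [if_pos hshort, if_pos hshort]
  · rw [if_neg hshort, if_neg hshort]
    push_neg at hshort
    obtain ⟨kn, rfl⟩ : ∃ kn : Nat, k = (kn : Int) := ⟨k.toNat, by omega⟩
    have hkn : 0 < kn := by omega
    have hls : kn ≤ s.toList.length := by omega
    have hlt : kn ≤ t.toList.length := by omega
    rw [pv_init_hash t.toList kn hlt, pv_init_hash s.toList kn hls]
    have h0 := pv_searchEq s.toList t.toList kn hkn hls hlt (s.toList.length - kn + 1) 0 (by omega)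
    simpa using h0
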